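-- pv_equiv track=rewrite | github.com/kindofwwy/Oxtest | abtest.py | lglist
-- ===== SOURCE A (Python) =====
-- def lglist(value, previous, mode): #return cut or not
--     if mode:
--         for i in previous[0]:
--             if value<=i:
--                 return True
--         return False
--
--     else:
--         for i in previous[1]:
--             if value >= i:
--                 return True
--         return False
-- ===== SOURCE B (Python) =====
-- def lglist(value, previous, mode):
--     if mode:
--         xs = previous[0]
--         return bool(xs) and value <= max(xs)
--     else:
--         xs = previous[1]
--         return bool(xs) and value >= min(xs)
-- ===== Notes on version B (the rewrite author's own statement) =====
-- stated objective: simpler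
-- what changed: A's element-by-element early-exit scan is replaced by a single aggregate reduction (max for mode True, min for mode False) followed by one comparison, with an empty-list guard.
import Mathlib
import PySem

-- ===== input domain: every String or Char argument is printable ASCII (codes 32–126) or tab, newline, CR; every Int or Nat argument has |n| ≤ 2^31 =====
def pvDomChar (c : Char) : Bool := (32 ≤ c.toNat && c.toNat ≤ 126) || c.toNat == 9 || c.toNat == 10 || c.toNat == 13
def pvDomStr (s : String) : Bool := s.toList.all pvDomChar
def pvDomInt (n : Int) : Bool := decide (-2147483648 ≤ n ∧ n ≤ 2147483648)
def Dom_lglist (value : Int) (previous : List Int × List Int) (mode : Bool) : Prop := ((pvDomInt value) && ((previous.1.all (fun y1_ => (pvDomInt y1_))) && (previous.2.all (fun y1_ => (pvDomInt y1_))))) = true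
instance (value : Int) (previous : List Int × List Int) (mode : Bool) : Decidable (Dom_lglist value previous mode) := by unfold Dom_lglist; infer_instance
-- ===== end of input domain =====

-- B replaces A's element-by-element early-exit scan by an aggregate max/min reduction plus one comparison (objective: simpler).

-- ===== PORT A =====
-- the 'for i in previous[0]: if value<=i: return True' loop
def lglistScanLe (value : Int) : List Int → Bool
  | [] => false
  | i :: t => if value ≤ i then true else lglistScanLe value t

-- the 'for i in previous[1]: if value >= i: return True' loop
def lglistScanGe (value : Int) : List Int → Bool
  | [] => false
  | i :: t => if value ≥ i then true else lglistScanGe value t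

def lglist (value : Int) (previous : List Int × List Int) (mode : Bool) : Bool :=
  if mode then lglistScanLe value previous.1 else lglistScanGe value previous.2

-- ===== PORT B =====
-- 'bool(xs) and value <= max(xs)' / 'bool(xs) and value >= min(xs)'
def lglist_alt (value : Int) (previous : List Int × List Int) (mode : Bool) : Bool :=
  if mode then
    match PySem.List.max? previous.1 (fun y => y) with
    | none => false
    | some m => decide (value ≤ m)
  else
    match PySem.List.min? previous.2 (fun y => y) with
    | none => false
    | some m => decide (value ≥ m)

-- ===== PRECONDITION & SPEC =====
def Spec_lglist (value : Int) (previous : List Int × List Int) (mode : Bool) (out : Bool) : Prop := out = lglist_alt value previous mode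
instance (value : Int) (previous : List Int × List Int) (mode : Bool) (out : Bool) : Decidable (Spec_lglist value previous mode out) := by unfold Spec_lglist; infer_instance

-- ===== CLAIM (what is proved, stated in full; the proofs are below) =====
def Claim_equal_lglist : Prop := ∀ (value : Int) (previous : List Int × List Int) (mode : Bool), Dom_lglist value previous mode → Spec_lglist value previous mode (lglist value previous mode)

-- ===== LEMMAS AND PROOFS =====

theorem lglistScanLe_eq_exists (value : Int) (xs : List Int) :
    lglistScanLe value xs = decide (∃ i ∈ xs, value ≤ i) := by
  induction xs with
  | nil => simp [lglistScanLe]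
  | cons x t ih =>
    by_cases h : value ≤ x <;> simp [lglistScanLe, h, ih]

theorem lglistScanGe_eq_exists (value : Int) (xs : List Int) :
    lglistScanGe value xs = decide (∃ i ∈ xs, i ≤ value) := by
  induction xs with
  | nil => simp [lglistScanGe]
  | cons x t ih =>
    by_cases h : x ≤ value <;> simp [lglistScanGe, ge_iff_le, h, ih]

theorem lglist_spec : Claim_equal_lglist := by
  intro value previous mode _
  unfold Spec_lglist lglist lglist_alt
  cases mode with
  | true =>
    simp only [if_true]
    cases hm : PySem.List.max? previous.1 (fun y => y) with
    | none =>
      rw [PySem.List.max?_eq_none_iff] at hm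
      simp [hm, lglistScanLe]
    | some m =>
      have hmem := PySem.List.max?_mem hm
      have hmax := PySem.List.max?_isMax hm
      rw [lglistScanLe_eq_exists]
      by_cases h : value ≤ m
      · simp only [h, decide_true, decide_eq_true_eq]
        exact ⟨m, hmem, h⟩
      · simp only [h, decide_false, decide_eq_false_iff_not]
        rintro ⟨i, hi, hv⟩
        have := hmax i hi
        omega
  | false =>
    simp only [Bool.false_eq_true, reduceIte]
    cases hm : PySem.List.min? previous.2 (fun y => y) with
    | none =>
      rw [PySem.List.min?_eq_none_iff] at hm
      simp [hm, lglistScanGe]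
    | some m =>
      have hmem := PySem.List.min?_mem hm
      have hmin := PySem.List.min?_isMin hm
      rw [lglistScanGe_eq_exists]
      by_cases h : m ≤ value
      · simp only [ge_iff_le, h, decide_true, decide_eq_true_eq]
        exact ⟨m, hmem, h⟩
      · simp only [ge_iff_le, h, decide_false, decide_eq_false_iff_not]
        rintro ⟨i, hi, hv⟩
        have := hmin i hi
        omega
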